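-- pv_equiv track=rewrite | github.com/MarkBevz50/ProgrammingPython- | Python/Дз-3/Дз 3.1.py | AlgSum
-- ===== SOURCE A (Python) =====
-- def AlgSum(arr):
--     sum = 0
--     for i in range(len(arr)):
--         if i >= 2 and (arr[i-1] == 10 or arr[i-2] == 10):
--             sum += arr[i] * 2
--         else:
--             sum += arr[i]
--     return sum
-- ===== SOURCE B (Python) =====
-- def AlgSum(arr):
--     n = len(arr)
--     marked = set()
--     for j in range(n):
--         if arr[j] == 10:
--             for i in (j + 1, j + 2):
--                 if 2 <= i < n:
--                     marked.add(i)
--     return sum(arr) + sum(arr[i] for i in marked)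
-- ===== Notes on version B (the rewrite author's own statement) =====
-- stated objective: alternative
-- what changed: Inverts the computation: instead of a per-element 1x/2x branch, B scans for occurrences of 10, builds a set of marked indices (j+1 and j+2 for each 10 at j, clipped to [2,n), the set dedups overlapping 10s), and returns sum(arr) plus the sum of the marked elements.
import Mathlib
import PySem

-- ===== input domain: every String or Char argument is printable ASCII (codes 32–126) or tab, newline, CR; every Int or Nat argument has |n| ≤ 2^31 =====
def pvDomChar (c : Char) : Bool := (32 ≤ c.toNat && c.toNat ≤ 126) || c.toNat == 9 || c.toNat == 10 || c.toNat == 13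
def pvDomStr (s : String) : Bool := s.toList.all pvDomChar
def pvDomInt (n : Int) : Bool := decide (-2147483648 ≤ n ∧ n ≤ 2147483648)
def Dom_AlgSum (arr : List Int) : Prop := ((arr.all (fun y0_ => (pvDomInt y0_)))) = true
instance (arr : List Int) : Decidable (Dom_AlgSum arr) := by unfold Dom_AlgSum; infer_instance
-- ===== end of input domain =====

-- B inverts A's per-element 1x/2x branch: it collects the indices marked by each 10 (j+1, j+2,
-- clipped to [2,n)) into a set and returns sum(arr) plus the sum of the marked elements
-- (alternative decomposition, same O(n) cost).

-- ===== PORT A =====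
-- literal port of A: one fold over range(len(arr)); arr[i], arr[i-1], arr[i-2] are always
-- in range on this loop, so pyGetD with default 0 is exact here.
def AlgSum (arr : List Int) : Int :=
  (PySem.List.pyRange 0 arr.length 1).foldl
    (fun s i =>
      if 2 ≤ i ∧ (PySem.List.pyGetD arr (i - 1) 0 = 10 ∨ PySem.List.pyGetD arr (i - 2) 0 = 10) then
        s + PySem.List.pyGetD arr i 0 * 2
      else
        s + PySem.List.pyGetD arr i 0) 0

-- ===== PORT B =====
-- literal port of Source B: build the marked index set by scanning for 10s (inner loop over the
-- two candidate indices j+1, j+2), then sum(arr) + sum of the marked elements. Summing the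
-- set's elements is order-independent, so iterating the PySem.Set (insertion order) is exact.
def AlgSum_alt (arr : List Int) : Int :=
  let n : Int := arr.length
  let marked : PySem.Set Int :=
    (PySem.List.pyRange 0 n 1).foldl
      (fun s j =>
        if PySem.List.pyGetD arr j 0 = 10 then
          [j + 1, j + 2].foldl (fun s i => if 2 ≤ i ∧ i < n then PySem.Set.add s i else s) s
        else s)
      PySem.Set.empty
  arr.sum + (marked.map (fun i => PySem.List.pyGetD arr i 0)).sum

-- ===== PRECONDITION & SPEC =====
def Spec_AlgSum (arr : List Int) (out : Int) : Prop := out = AlgSum_alt arr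
instance (arr : List Int) (out : Int) : Decidable (Spec_AlgSum arr out) := by unfold Spec_AlgSum; infer_instance

-- ===== CLAIM (what is proved, stated in full; the proofs are below) =====
def Claim_equal_AlgSum : Prop := ∀ (arr : List Int), Dom_AlgSum arr → Spec_AlgSum arr (AlgSum arr)

-- ===== LEMMAS AND PROOFS =====

-- the reference index list both ports' corrective terms range over
def pvMarkedRef (arr : List Int) : List Int :=
  (PySem.List.pyRange 2 arr.length 1).filter
    (fun i => decide (PySem.List.pyGetD arr (i - 1) 0 = 10 ∨ PySem.List.pyGetD arr (i - 2) 0 = 10))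

-- sum over a filtered-then-mapped list equals the sum of the 0-padded map
theorem pv_sum_filter_map (p : Int → Bool) (f : Int → Int) (l : List Int) :
    ((l.filter p).map f).sum = (l.map (fun i => if p i then f i else 0)).sum := by
  induction l with
  | nil => simp
  | cons x t ih =>
      by_cases h : p x <;> simp [h, ih]

-- A's fold written as a sum of per-index terms
theorem pv_A_as_sum (arr : List Int) :
    AlgSum arr =
      ((PySem.List.pyRange 0 arr.length 1).map
        (fun i =>
          PySem.List.pyGetD arr i 0 +
            if 2 ≤ i ∧ (PySem.List.pyGetD arr (i - 1) 0 = 10 ∨ PySem.List.pyGetD arr (i - 2) 0 = 10) then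
              PySem.List.pyGetD arr i 0
            else 0)).sum := by
  unfold AlgSum
  have hstep :
      (fun (s i : Int) =>
        if 2 ≤ i ∧ (PySem.List.pyGetD arr (i - 1) 0 = 10 ∨ PySem.List.pyGetD arr (i - 2) 0 = 10) then
          s + PySem.List.pyGetD arr i 0 * 2
        else
          s + PySem.List.pyGetD arr i 0) =
      (fun (s i : Int) =>
        s + (PySem.List.pyGetD arr i 0 +
          if 2 ≤ i ∧ (PySem.List.pyGetD arr (i - 1) 0 = 10 ∨ PySem.List.pyGetD arr (i - 2) 0 = 10) then
            PySem.List.pyGetD arr i 0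
          else 0)) := by
    funext s i; split_ifs with h <;> ring
  rw [hstep, PySem.List.foldl_add, zero_add]

-- A equals sum(arr) plus the correction over the reference index list
theorem pv_A_eq_ref (arr : List Int) :
    AlgSum arr =
      arr.sum + ((pvMarkedRef arr).map (fun i => PySem.List.pyGetD arr i 0)).sum := by
  rw [pv_A_as_sum]
  unfold pvMarkedRef
  rw [pv_sum_filter_map]
  set x : Int → Int := fun i => PySem.List.pyGetD arr i 0 with hx
  set q : Int → Prop := fun i =>
    PySem.List.pyGetD arr (i - 1) 0 = 10 ∨ PySem.List.pyGetD arr (i - 2) 0 = 10 with hq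
  have hsplit :
      ((PySem.List.pyRange 0 arr.length 1).map
        (fun i => x i + if 2 ≤ i ∧ q i then x i else 0)).sum =
      ((PySem.List.pyRange 0 arr.length 1).map x).sum +
        ((PySem.List.pyRange 0 arr.length 1).map (fun i => if 2 ≤ i ∧ q i then x i else 0)).sum :=
    PySem.List.sum_map_add_int _ _ _
  rw [hsplit]
  have hbase : ((PySem.List.pyRange 0 arr.length 1).map x).sum = arr.sum := by
    rw [hx, PySem.List.map_pyGetD_pyRange_zero']
  rw [hbase]
  congr 1
  by_cases hn : (2 : Int) ≤ arr.length
  · rw [PySem.List.pyRange_one_append 0 2 arr.length (by norm_num) hn, List.map_append,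
        List.sum_append]
    have h02 : PySem.List.pyRange 0 2 1 = [0, 1] := by decide
    have hz :
        ((PySem.List.pyRange 0 2 1).map (fun i => if 2 ≤ i ∧ q i then x i else 0)).sum = 0 := by
      rw [h02]; simp
    rw [hz, zero_add]
    have hcongr :
        (PySem.List.pyRange 2 arr.length 1).map (fun i => if 2 ≤ i ∧ q i then x i else 0) =
        (PySem.List.pyRange 2 arr.length 1).map
          (fun i => if decide (q i) = true then x i else 0) := by
      apply List.map_congr_left
      intro i hi
      have h2 : (2 : Int) ≤ i := (PySem.List.mem_pyRange_one.mp hi).1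
      by_cases hqi : q i
      · simp [hqi, h2]
      · simp [hqi]
    rw [hcongr]
  · have hr2 : PySem.List.pyRange 2 arr.length 1 = [] :=
      PySem.List.pyRange_one_eq_nil (by omega)
    rw [hr2]
    have hz :
        (PySem.List.pyRange 0 arr.length 1).map (fun i => if 2 ≤ i ∧ q i then x i else 0) =
        (PySem.List.pyRange 0 arr.length 1).map (fun _ => (0 : Int)) := by
      apply List.map_congr_left
      intro i hi
      have := PySem.List.mem_pyRange_one.mp hi
      have hni : ¬ (2 ≤ i ∧ q i) := by rintro ⟨h2, -⟩; omega
      simp [hni]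
    rw [hz]; simp

-- B's outer-loop step
def pvStep (arr : List Int) (s : PySem.Set Int) (j : Int) : PySem.Set Int :=
  if PySem.List.pyGetD arr j 0 = 10 then
    [j + 1, j + 2].foldl
      (fun s i => if 2 ≤ i ∧ i < (arr.length : Int) then PySem.Set.add s i else s) s
  else s

-- membership in the inner two-candidate fold
theorem pv_add2_mem (s : PySem.Set Int) (n j y : Int) :
    y ∈ ([j + 1, j + 2].foldl (fun s i => if 2 ≤ i ∧ i < n then PySem.Set.add s i else s) s) ↔
      y ∈ s ∨ ((y = j + 1 ∨ y = j + 2) ∧ 2 ≤ y ∧ y < n) := by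
  simp only [List.foldl_cons, List.foldl_nil]
  by_cases h1 : 2 ≤ j + 1 ∧ j + 1 < n <;> by_cases h2 : 2 ≤ j + 2 ∧ j + 2 < n <;>
    simp only [h1, h2, and_self, if_true, if_false, PySem.Set.mem_add]
  · constructor
    · rintro ((h | rfl) | rfl)
      · exact Or.inl h
      · exact Or.inr ⟨Or.inl rfl, h1⟩
      · exact Or.inr ⟨Or.inr rfl, h2⟩
    · rintro (h | ⟨hy, hb⟩)
      · exact Or.inl (Or.inl h)
      · rcases hy with rfl | rfl
        · exact Or.inl (Or.inr rfl)
        · exact Or.inr rfl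
  · constructor
    · rintro (h | rfl)
      · exact Or.inl h
      · exact Or.inr ⟨Or.inl rfl, h1⟩
    · rintro (h | ⟨hy, hb⟩)
      · exact Or.inl h
      · rcases hy with rfl | rfl
        · exact Or.inr rfl
        · exact absurd hb h2
  · constructor
    · rintro (h | rfl)
      · exact Or.inl h
      · exact Or.inr ⟨Or.inr rfl, h2⟩
    · rintro (h | ⟨hy, hb⟩)
      · exact Or.inl h
      · rcases hy with rfl | rfl
        · exact absurd hb h1
        · exact Or.inr rfl
  · constructor
    · exact Or.inl
    · rintro (h | ⟨hy, hb⟩)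
      · exact h
      · rcases hy with rfl | rfl
        · exact absurd hb h1
        · exact absurd hb h2

theorem pv_mem_step (arr : List Int) (s : PySem.Set Int) (j y : Int) :
    y ∈ pvStep arr s j ↔
      y ∈ s ∨ (PySem.List.pyGetD arr j 0 = 10 ∧ (y = j + 1 ∨ y = j + 2) ∧
        2 ≤ y ∧ y < (arr.length : Int)) := by
  unfold pvStep
  by_cases h10 : PySem.List.pyGetD arr j 0 = 10
  · simp only [h10, if_true, true_and]
    exact pv_add2_mem s (arr.length : Int) j y
  · simp [h10]

theorem pv_nodup_step (arr : List Int) (s : PySem.Set Int) (j : Int) (hs : s.Nodup) :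
    (pvStep arr s j).Nodup := by
  unfold pvStep
  split_ifs with h10
  · simp only [List.foldl_cons, List.foldl_nil]
    split_ifs <;> first
      | exact PySem.Set.nodup_add _ _ (PySem.Set.nodup_add _ _ hs)
      | exact PySem.Set.nodup_add _ _ hs
      | exact hs
  · exact hs

-- membership of the fold of pvStep
theorem pv_mem_foldl_step (arr : List Int) (l : List Int) (s : PySem.Set Int) (y : Int) :
    y ∈ l.foldl (pvStep arr) s ↔
      y ∈ s ∨ ∃ j ∈ l, PySem.List.pyGetD arr j 0 = 10 ∧ (y = j + 1 ∨ y = j + 2) ∧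
        2 ≤ y ∧ y < (arr.length : Int) := by
  induction l generalizing s with
  | nil => simp
  | cons a t ih =>
      rw [List.foldl_cons, ih, pv_mem_step]
      constructor
      · rintro ((h | h) | ⟨j, hj, hrest⟩)
        · exact Or.inl h
        · exact Or.inr ⟨a, List.mem_cons_self .., h⟩
        · exact Or.inr ⟨j, List.mem_cons_of_mem _ hj, hrest⟩
      · rintro (h | ⟨j, hj, hrest⟩)
        · exact Or.inl (Or.inl h)
        · rcases List.mem_cons.mp hj with rfl | hj
          · exact Or.inl (Or.inr hrest)
          · exact Or.inr ⟨j, hj, hrest⟩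

theorem pv_nodup_foldl_step (arr : List Int) (l : List Int) (s : PySem.Set Int)
    (hs : s.Nodup) : (l.foldl (pvStep arr) s).Nodup := by
  induction l generalizing s with
  | nil => exact hs
  | cons a t ih => exact ih _ (pv_nodup_step arr s a hs)

-- B's marked set has exactly the members of the reference list
theorem pv_marked_mem (arr : List Int) (y : Int) :
    y ∈ (PySem.List.pyRange 0 arr.length 1).foldl (pvStep arr) PySem.Set.empty ↔
      y ∈ pvMarkedRef arr := by
  rw [pv_mem_foldl_step]
  unfold pvMarkedRef
  simp only [List.mem_filter, PySem.List.mem_pyRange_one, PySem.Set.empty, List.not_mem_nil,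
    false_or, decide_eq_true_eq]
  constructor
  · rintro ⟨j, hj, h10, hy, h2, hn⟩
    refine ⟨⟨h2, hn⟩, ?_⟩
    rcases hy with rfl | rfl
    · left; rw [show j + 1 - 1 = j from by ring]; exact h10
    · right; rw [show j + 2 - 2 = j from by ring]; exact h10
  · rintro ⟨⟨h2, hn⟩, h10 | h10⟩
    · exact ⟨y - 1, by omega, h10, Or.inl (by ring), h2, hn⟩
    · exact ⟨y - 2, by omega, h10, Or.inr (by ring), h2, hn⟩

-- B equals sum(arr) plus the correction over the reference index list
theorem pv_B_eq_ref (arr : List Int) :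
    AlgSum_alt arr =
      arr.sum + ((pvMarkedRef arr).map (fun i => PySem.List.pyGetD arr i 0)).sum := by
  unfold AlgSum_alt
  simp only []
  congr 1
  have hperm :
      ((PySem.List.pyRange 0 (arr.length : Int) 1).foldl (pvStep arr) PySem.Set.empty).Perm
        (pvMarkedRef arr) := by
    apply (List.perm_ext_iff_of_nodup ?_ ?_).mpr
    · intro y; exact pv_marked_mem arr y
    · exact pv_nodup_foldl_step arr _ _ List.nodup_nil
    · exact (PySem.List.nodup_pyRange_one 2 arr.length).filter _
  have : ((PySem.List.pyRange 0 (arr.length : Int) 1).foldl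
      (fun s j =>
        if PySem.List.pyGetD arr j 0 = 10 then
          [j + 1, j + 2].foldl
            (fun s i => if 2 ≤ i ∧ i < (arr.length : Int) then PySem.Set.add s i else s) s
        else s) PySem.Set.empty) =
      (PySem.List.pyRange 0 (arr.length : Int) 1).foldl (pvStep arr) PySem.Set.empty := rfl
  rw [this]
  exact (hperm.map _).sum_eq

-- ===== VERDICT (by name: the statement is the Claim_ definition above) =====
theorem AlgSum_spec : Claim_equal_AlgSum := by
  intro arr _
  unfold Spec_AlgSum
  rw [pv_A_eq_ref, pv_B_eq_ref]
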